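-- pv_equiv track=rewrite | github.com/AUTODIAL/AutoEIS | autoeis/utils.py | generate_mathematical_expr
-- ===== SOURCE A (Python) =====
-- def generate_mathematical_expr(circuit:str) -> str:
--     """Converts a circuit string to a mathematical expression.
--
--     Each variable in the expression is the impedance of the
--     corresponding component.
--     """
--     replacements = {
--         "-": "+",
--         "[": "((",
--         ",": ")**(-1)+(",
--         "]": ")**(-1))**(-1)"
--     }
--     for j, k in replacements.items():
--         circuit = circuit.replace(j, k)
--     return circuit
-- ===== SOURCE B (Python) =====
-- def generate_mathematical_expr(circuit: str) -> str:
--     """Converts a circuit string to a mathematical expression.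
--
--     Builds the result back-to-front: iterate over the circuit in reverse
--     and prepend each character's expansion, chosen by an explicit if-chain
--     (no replacement table, no full-string replace passes).
--     """
--     out = ""
--     for ch in reversed(circuit):
--         if ch == "-":
--             out = "+" + out
--         elif ch == "[":
--             out = "((" + out
--         elif ch == ",":
--             out = ")**(-1)+(" + out
--         elif ch == "]":
--             out = ")**(-1))**(-1)" + out
--         else:
--             out = ch + out
--     return out
-- ===== Notes on version B (the rewrite author's own statement) =====
-- stated objective: alternative
-- what changed: Four sequential full-string str.replace passes are replaced by a single reverse traversal that prepends each character's expansion chosen by an explicit if-chain, building the output back-to-front with no replacement table; safe because every key is a single character and no expansion contains a key substituted later.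
import Mathlib
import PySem

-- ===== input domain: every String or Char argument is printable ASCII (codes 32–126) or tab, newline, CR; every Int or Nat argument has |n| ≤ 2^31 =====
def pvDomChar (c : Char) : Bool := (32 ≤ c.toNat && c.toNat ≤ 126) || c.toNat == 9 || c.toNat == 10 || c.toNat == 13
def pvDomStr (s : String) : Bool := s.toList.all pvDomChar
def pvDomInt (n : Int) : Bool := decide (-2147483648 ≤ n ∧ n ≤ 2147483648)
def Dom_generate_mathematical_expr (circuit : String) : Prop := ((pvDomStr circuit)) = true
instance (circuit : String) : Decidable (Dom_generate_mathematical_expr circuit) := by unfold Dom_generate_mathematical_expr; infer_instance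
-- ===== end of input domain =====

-- B replaces A's four sequential full-string replace passes by one reverse traversal that
-- prepends each character's expansion chosen by an explicit if-chain (objective: alternative).

-- ===== PORT A =====
def generate_mathematical_expr (circuit : String) : String :=
  let replacements : PySem.Dict String String :=
    (((PySem.Dict.empty.insert "-" "+").insert "[" "((").insert "," ")**(-1)+(").insert "]" ")**(-1))**(-1)"
  replacements.items.foldl (fun s jk => PySem.Str.replace s jk.1 jk.2) circuit

-- ===== PORT B =====
-- reversed iteration with prepending = right fold over the characters
def generate_mathematical_expr_alt (circuit : String) : String :=
  circuit.toList.foldr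
    (fun ch out =>
      (if ch = '-' then "+"
       else if ch = '[' then "(("
       else if ch = ',' then ")**(-1)+("
       else if ch = ']' then ")**(-1))**(-1)"
       else String.ofList [ch]) ++ out) ""

-- ===== PRECONDITION & SPEC =====
def Spec_generate_mathematical_expr (circuit : String) (out : String) : Prop := out = generate_mathematical_expr_alt circuit
instance (circuit : String) (out : String) : Decidable (Spec_generate_mathematical_expr circuit out) := by unfold Spec_generate_mathematical_expr; infer_instance

-- ===== CLAIM (what is proved, stated in full; the proofs are below) =====
def Claim_equal_generate_mathematical_expr : Prop := ∀ (circuit : String), Dom_generate_mathematical_expr circuit → Spec_generate_mathematical_expr circuit (generate_mathematical_expr circuit)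

-- ===== LEMMAS AND PROOFS =====

-- B's per-character expansion, on the char-list side
def pvExp (c : Char) : List Char :=
  if c = '-' then "+".toList
  else if c = '[' then "((".toList
  else if c = ',' then ")**(-1)+(".toList
  else if c = ']' then ")**(-1))**(-1)".toList
  else [c]

-- str.replace with a single-character pattern is a character-wise flatMap
lemma pv_go_single (j : Char) (new : List Char) :
    ∀ (fuel : Nat) (s acc : List Char), s.length ≤ fuel →
      PySem.Chars.replace.go [j] new fuel s acc
        = acc.reverse ++ s.flatMap (fun c => if c = j then new else [c]) := by
  intro fuel
  induction fuel with
  | zero =>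
    intro s acc h
    have hs : s = [] := List.length_eq_zero_iff.mp (Nat.le_zero.mp h)
    subst hs
    simp [PySem.Chars.replace.go]
  | succ n ih =>
    intro s acc h
    cases s with
    | nil => simp [PySem.Chars.replace.go]
    | cons c t =>
      simp only [PySem.Chars.replace.go]
      by_cases hc : c = j
      · subst hc
        rw [if_pos (by simp [List.isPrefixOf])]
        simp only [List.length_cons] at h
        rw [ih _ _ (by simpa using Nat.le_of_succ_le_succ h)]
        simp
      · rw [if_neg (by simp [List.isPrefixOf]; exact fun hh => hc hh.symm)]
        simp only [List.length_cons] at h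
        rw [ih t (c :: acc) (Nat.le_of_succ_le_succ h)]
        simp [hc]

lemma pv_replace_single (s : List Char) (j : Char) (new : List Char) :
    PySem.Chars.replace s [j] new = s.flatMap (fun c => if c = j then new else [c]) := by
  rw [PySem.Chars.replace]
  rw [if_neg (by simp)]
  exact pv_go_single j new s.length s [] le_rfl

-- composing A's four character-wise substitutions gives B's per-character expansion
-- (no replacement value contains a key that is substituted later)
lemma pv_per_char (c : Char) :
    List.flatMap
      (fun x => List.flatMap
        (fun x => List.flatMap (fun c => if c = ']' then ")**(-1))**(-1)".toList else [c])
          (if x = ',' then ")**(-1)+(".toList else [x]))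
        (if x = '[' then "((".toList else [x]))
      (if c = '-' then "+".toList else [c]) = pvExp c := by
  by_cases h1 : c = '-'
  · subst h1; decide
  by_cases h2 : c = '['
  · subst h2; decide
  by_cases h3 : c = ','
  · subst h3; decide
  by_cases h4 : c = ']'
  · subst h4; decide
  simp [pvExp, h1, h2, h3, h4]

-- A's value as a chain of character-wise flatMaps
lemma pv_A_eq (circuit : String) : generate_mathematical_expr circuit
    = String.ofList ((((circuit.toList.flatMap (fun c => if c = '-' then "+".toList else [c])).flatMap
        (fun c => if c = '[' then "((".toList else [c])).flatMap
        (fun c => if c = ',' then ")**(-1)+(".toList else [c])).flatMap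
        (fun c => if c = ']' then ")**(-1))**(-1)".toList else [c])) := by
  show (PySem.Dict.items
      ((((PySem.Dict.empty.insert "-" "+").insert "[" "((").insert "," ")**(-1)+(").insert "]" ")**(-1))**(-1)")).foldl
      (fun s jk => PySem.Str.replace s jk.1 jk.2) circuit = _
  rw [show PySem.Dict.items
      ((((PySem.Dict.empty.insert "-" "+").insert "[" "((").insert "," ")**(-1)+(").insert "]" ")**(-1))**(-1)")
      = [("-","+"),("[","(("),(",",")**(-1)+("),("]",")**(-1))**(-1)")] from rfl]
  simp only [List.foldl_cons, List.foldl_nil, PySem.Str.replace, String.toList_ofList]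
  rw [show ("-" : String).toList = ['-'] from rfl, show ("[" : String).toList = ['['] from rfl,
      show ("," : String).toList = [','] from rfl, show ("]" : String).toList = [']'] from rfl]
  rw [pv_replace_single, pv_replace_single, pv_replace_single, pv_replace_single]

-- B's value as one character-wise flatMap
lemma pv_B_eq (circuit : String) :
    generate_mathematical_expr_alt circuit = String.ofList (circuit.toList.flatMap pvExp) := by
  unfold generate_mathematical_expr_alt
  induction circuit.toList with
  | nil => rfl
  | cons c t ih =>
    simp only [List.foldr_cons, List.flatMap_cons, ih]
    apply String.toList_injective
    simp [pvExp, String.toList_append]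
    split_ifs <;> simp_all

-- ===== VERDICT (by name: the statement is the Claim_ definition above) =====
theorem generate_mathematical_expr_spec : Claim_equal_generate_mathematical_expr := by
  intro circuit _
  unfold Spec_generate_mathematical_expr
  rw [pv_A_eq, pv_B_eq]
  apply congrArg String.ofList
  simp only [List.flatMap_assoc]
  exact congrArg (fun f => List.flatMap f circuit.toList) (funext fun c => pv_per_char c)
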